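-- pv_equiv track=rewrite | github.com/8Hors8/OSI | statement_processing/distribution/distribution_utils.py | build_column_ranges
-- ===== SOURCE A (Python) =====
-- def build_column_ranges(items: list[tuple[str, int]]) -> list[tuple[str, int, int]]:
--     """
--     Возвращает список (month, start_col, end_col)
--     """
--     if not items:
--         return []
--
--     ranges = []
--     column_range = None
--
--     for i in range(len(items)):
--         month, start_col = items[i]
--
--         if i + 1 < len(items):
--             end_col = items[i + 1][1]
--             column_range = end_col - start_col
--         else:
--             if column_range is None:
--                 return []
--             end_col = start_col + column_range
--
--         ranges.append((month, start_col, end_col))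
--
--     return ranges
-- ===== SOURCE B (Python) =====
-- def build_column_ranges(items: list[tuple[str, int]]) -> list[tuple[str, int, int]]:
--     """
--     Возвращает список (month, start_col, end_col)
--     """
--     if len(items) < 2:
--         return []
--     rev = list(reversed(items))
--     end = 2 * rev[0][1] - rev[1][1]
--     out = []
--     for month, start in rev:
--         out.append((month, start, end))
--         end = start
--     out.reverse()
--     return out
-- ===== Notes on version B (the rewrite author's own statement) =====
-- stated objective: alternative
-- what changed: Traverses the list back-to-front: seeds the final end with the extrapolated boundary 2*last-second_last, then walks the reversed list carrying the previous start as the next item's end, so the per-element look-ahead (items[i+1]) and the running column_range accumulator of A disappear; result is reversed at the end.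
import Mathlib
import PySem

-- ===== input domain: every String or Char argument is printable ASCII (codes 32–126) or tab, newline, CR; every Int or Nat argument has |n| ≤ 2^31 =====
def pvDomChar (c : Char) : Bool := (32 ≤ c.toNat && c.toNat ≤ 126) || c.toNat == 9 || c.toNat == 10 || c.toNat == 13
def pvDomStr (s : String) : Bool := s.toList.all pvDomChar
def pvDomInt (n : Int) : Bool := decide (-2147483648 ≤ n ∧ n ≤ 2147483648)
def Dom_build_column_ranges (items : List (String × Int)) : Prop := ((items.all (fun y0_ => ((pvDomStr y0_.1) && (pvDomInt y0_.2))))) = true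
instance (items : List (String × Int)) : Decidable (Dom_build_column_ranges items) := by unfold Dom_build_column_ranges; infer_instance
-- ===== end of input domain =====

-- B traverses the reversed list, seeding the final end with 2*last-second_last and carrying the
-- previous start as the next item's end; no look-ahead and no running column_range. Objective: alternative.

-- ===== PORT A =====
-- A's for-loop over i with look-ahead items[i+1] and the running 'column_range', transcribed as
-- structural recursion on (current item, remaining items, column_range); 'none' = the early 'return []'.
def bcrLoop : (String × Int) → List (String × Int) → Option Int → Option (List (String × Int × Int))
  | (month, start_col), [], columnRange =>
      match columnRange with
      | none => none                                   -- 'if column_range is None: return []'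
      | some c => some [(month, start_col, start_col + c)]
  | (month, start_col), (m', s') :: rest, _ =>
      (bcrLoop (m', s') rest (some (s' - start_col))).map
        (fun tl => (month, start_col, s') :: tl)       -- end_col = items[i+1][1]; column_range = end_col - start_col

def build_column_ranges (items : List (String × Int)) : List (String × Int × Int) :=
  match items with
  | [] => []                                           -- 'if not items: return []'
  | x :: rest => (bcrLoop x rest none).getD []

-- ===== PORT B =====
-- faithful to Source B: rev = list(reversed(items)); end = 2*rev[0][1] - rev[1][1];
-- one fold over rev appending (month, start, end) and setting end = start; then out.reverse().
def build_column_ranges_alt (items : List (String × Int)) : List (String × Int × Int) :=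
  if items.length < 2 then []
  else
    let rev := items.reverse
    let e0 := 2 * ((PySem.List.pyGet? rev 0).getD ("", 0)).2
                - ((PySem.List.pyGet? rev 1).getD ("", 0)).2
    let out := (rev.foldl
        (fun (acc : List (String × Int × Int) × Int) (p : String × Int) =>
          (acc.1 ++ [(p.1, p.2, acc.2)], p.2)) ([], e0)).1
    out.reverse

-- ===== PRECONDITION & SPEC =====
def Spec_build_column_ranges (items : List (String × Int)) (out : List (String × Int × Int)) : Prop := out = build_column_ranges_alt items
instance (items : List (String × Int)) (out : List (String × Int × Int)) : Decidable (Spec_build_column_ranges items out) := by unfold Spec_build_column_ranges; infer_instance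

-- ===== CLAIM (what is proved, stated in full; the proofs are below) =====
def Claim_equal_build_column_ranges : Prop := ∀ (items : List (String × Int)), Dom_build_column_ranges items → Spec_build_column_ranges items (build_column_ranges items)

-- ===== LEMMAS AND PROOFS =====

-- common shape of both results on lists with ≥ 2 elements
def bcrCore : (String × Int) → (String × Int) → List (String × Int) → List (String × Int × Int)
  | (m, s), (m', s'), [] => [(m, s, s'), (m', s', s' + (s' - s))]
  | (m, s), (m', s'), z :: rest => (m, s, s') :: bcrCore (m', s') z rest

-- (second-last start, last start) of x :: y :: rest
def bcrLast2 : (String × Int) → (String × Int) → List (String × Int) → Int × Int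
  | x, y, [] => (x.2, y.2)
  | _, y, z :: rest => bcrLast2 y z rest

theorem bcrLoop_eq_core : ∀ (rest : List (String × Int)) (x y : String × Int) (cr : Option Int),
    bcrLoop x (y :: rest) cr = some (bcrCore x y rest) := by
  intro rest
  induction rest with
  | nil => intro ⟨m, s⟩ ⟨m', s'⟩ cr; simp [bcrLoop, bcrCore]
  | cons z rest ih =>
    intro ⟨m, s⟩ ⟨m', s'⟩ cr
    have h : bcrLoop (m, s) ((m', s') :: z :: rest) cr
        = (bcrLoop (m', s') (z :: rest) (some (s' - s))).map
            (fun tl => ((m, s, s') : String × Int × Int) :: tl) := rfl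
    rw [h, ih]
    simp [bcrCore]

-- B's loop body as structural recursion carrying the pending end value
def revLoop : List (String × Int) → Int → List (String × Int × Int)
  | [], _ => []
  | p :: tl, e => (p.1, p.2, e) :: revLoop tl p.2

-- the end value left after processing l (= last start, or e if l is empty)
def endOf : List (String × Int) → Int → Int
  | [], e => e
  | q :: tl, _ => endOf tl q.2

theorem foldl_eq_revLoop : ∀ (l : List (String × Int)) (acc : List (String × Int × Int)) (e : Int),
    (l.foldl (fun (acc : List (String × Int × Int) × Int) (p : String × Int) =>
        (acc.1 ++ [(p.1, p.2, acc.2)], p.2)) (acc, e)).1 = acc ++ revLoop l e := by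
  intro l
  induction l with
  | nil => intro acc e; simp [revLoop]
  | cons p tl ih =>
    intro acc e
    simp only [List.foldl_cons, revLoop, ih]
    simp

theorem endOf_append_singleton : ∀ (l : List (String × Int)) (p : String × Int) (e : Int),
    endOf (l ++ [p]) e = p.2 := by
  intro l
  induction l with
  | nil => intro p e; rfl
  | cons q tl ih => intro p e; simpa [endOf] using ih p q.2

theorem revLoop_append_singleton : ∀ (l : List (String × Int)) (p : String × Int) (e : Int),
    revLoop (l ++ [p]) e = revLoop l e ++ [(p.1, p.2, endOf l e)] := by
  intro l
  induction l with
  | nil => intro p e; rfl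
  | cons q tl ih => intro p e; simp [revLoop, endOf, ih]

theorem revLoop_reverse_eq : ∀ (rest : List (String × Int)) (x y : String × Int),
    revLoop ((x :: y :: rest).reverse)
      (2 * (bcrLast2 x y rest).2 - (bcrLast2 x y rest).1) = (bcrCore x y rest).reverse := by
  intro rest
  induction rest with
  | nil =>
    intro ⟨m, s⟩ ⟨m', s'⟩
    simp [revLoop, bcrLast2, bcrCore]
    omega
  | cons z rest ih =>
    intro ⟨m, s⟩ ⟨m', s'⟩
    have hrev : ((m, s) :: (m', s') :: z :: rest).reverse
        = ((m', s') :: z :: rest).reverse ++ [(m, s)] := by simp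
    have hend : endOf (((m', s') :: z :: rest).reverse)
        (2 * (bcrLast2 (m, s) (m', s') (z :: rest)).2 - (bcrLast2 (m, s) (m', s') (z :: rest)).1) = s' := by
      rw [show ((m', s') :: z :: rest).reverse = (z :: rest).reverse ++ [(m', s')] by simp,
          endOf_append_singleton]
    rw [hrev, revLoop_append_singleton, hend]
    have hb2 : bcrLast2 (m, s) (m', s') (z :: rest) = bcrLast2 (m', s') z rest := rfl
    rw [hb2, ih ⟨m', s'⟩ z]
    simp [bcrCore]

theorem rev_two : ∀ (rest : List (String × Int)) (x y : String × Int),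
    ∃ a b t, (x :: y :: rest).reverse = a :: b :: t
      ∧ a.2 = (bcrLast2 x y rest).2 ∧ b.2 = (bcrLast2 x y rest).1 := by
  intro rest
  induction rest with
  | nil => intro x y; exact ⟨y, x, [], by simp, rfl, rfl⟩
  | cons z rest ih =>
    intro x y
    obtain ⟨a, b, t, ht, ha, hb⟩ := ih y z
    refine ⟨a, b, t ++ [x], ?_, ha, hb⟩
    rw [show (x :: y :: z :: rest).reverse = (y :: z :: rest).reverse ++ [x] by simp, ht]
    simp

theorem bcr_eq (items : List (String × Int)) :
    build_column_ranges items = build_column_ranges_alt items := by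
  match items with
  | [] => rfl
  | [x] => simp [build_column_ranges, build_column_ranges_alt, bcrLoop]
  | x :: y :: rest =>
    obtain ⟨a, b, t, ht, ha, hb⟩ := rev_two rest x y
    simp only [build_column_ranges, bcrLoop_eq_core, Option.getD_some]
    rw [build_column_ranges_alt]
    simp only [List.length_cons]
    rw [if_neg (by omega)]
    rw [show ((x :: y :: rest).reverse.foldl
        (fun (acc : List (String × Int × Int) × Int) (p : String × Int) =>
          (acc.1 ++ [(p.1, p.2, acc.2)], p.2))
        ([], 2 * ((PySem.List.pyGet? (x :: y :: rest).reverse 0).getD ("", 0)).2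
              - ((PySem.List.pyGet? (x :: y :: rest).reverse 1).getD ("", 0)).2)).1
        = [] ++ revLoop ((x :: y :: rest).reverse)
            (2 * ((PySem.List.pyGet? (x :: y :: rest).reverse 0).getD ("", 0)).2
              - ((PySem.List.pyGet? (x :: y :: rest).reverse 1).getD ("", 0)).2)
      from foldl_eq_revLoop _ _ _]
    rw [ht]
    have h0 : PySem.List.pyGet? (a :: b :: t) 0 = some a := PySem.List.pyGet?_zero_cons a (b :: t)
    have h1 : PySem.List.pyGet? (a :: b :: t) 1 = some b := by
      simp [PySem.List.pyGet?, PySem.List.pyIdx?]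
    rw [h0, h1]
    simp only [Option.getD_some, ha, hb, List.nil_append]
    rw [← ht, revLoop_reverse_eq rest x y]
    simp

-- ===== VERDICT (by name: the statement is the Claim_ definition above) =====
theorem build_column_ranges_spec : Claim_equal_build_column_ranges := by
  intro items _
  exact bcr_eq items
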